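-- pv_equiv track=rewrite | github.com/DominikWolek/aoc_2025 | day_02/solution.py | do_check
-- ===== SOURCE A (Python) =====
-- def do_check(id, div):
--     length = len(id)
--     if length % div == 0:
--         devided = length // div
--         parts = [id[i * devided : (i + 1) * devided] for i in range(div)]
--         if all(part == parts[0] for part in parts):
--             return True
--     return False
-- ===== SOURCE B (Python) =====
-- def do_check(id, div):
--     length = len(id)
--     if length % div != 0:
--         return False
--     base = id[: length // div]
--     return base * div == id
-- ===== Notes on version B (the rewrite author's own statement) =====
-- stated objective: simpler
-- what changed: Instead of splitting the string into div parts and comparing each part to the first, B takes the single prefix of length len//div and checks that repeating it div times reconstructs the whole string.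
-- intended difference: For negative div that divides len(id) with id nonempty, A returns True (range(div) is empty so the all() is vacuous) while B returns False, which is intended since a nonempty string is not a concatenation of a negative number of parts. — e.g. on do_check("aa", -2): A returns true, B returns false
import Mathlib
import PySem

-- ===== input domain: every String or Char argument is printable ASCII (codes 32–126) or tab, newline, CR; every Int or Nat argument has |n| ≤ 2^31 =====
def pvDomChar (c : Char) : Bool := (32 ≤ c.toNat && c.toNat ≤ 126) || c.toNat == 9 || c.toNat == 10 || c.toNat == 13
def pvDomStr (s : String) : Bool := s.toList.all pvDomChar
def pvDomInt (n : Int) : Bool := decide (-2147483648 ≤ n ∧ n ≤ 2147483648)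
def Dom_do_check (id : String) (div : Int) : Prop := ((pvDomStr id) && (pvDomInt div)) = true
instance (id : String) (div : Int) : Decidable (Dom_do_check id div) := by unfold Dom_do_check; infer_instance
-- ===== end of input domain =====

-- B rebuilds the string from a single prefix (base * div == id) instead of splitting into div
-- parts and comparing each to the first: simpler. Intended difference (D_): for negative div
-- dividing len(id) with id nonempty, A vacuously returns True, B returns False.


-- ===== PORT A =====
-- strings are handled as their character lists (PySem.Chars convention)
def do_check (id : String) (div : Int) : Bool :=
  let s := id.toList
  let length : Int := s.length
  if PySem.Int.mod length div == 0 then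
    let devided := PySem.Int.floordiv length div
    let parts := (PySem.List.pyRange 0 div 1).map
      (fun i => PySem.List.slice s (some (i * devided)) (some ((i + 1) * devided)))
    -- all(part == parts[0] for part in parts): vacuously true on an empty list
    match parts with
    | [] => true
    | p0 :: _ => if parts.all (fun p => p == p0) then true else false
  else false

-- ===== PORT B =====
def do_check_alt (id : String) (div : Int) : Bool :=
  let s := id.toList
  let length : Int := s.length
  if PySem.Int.mod length div != 0 then false
  else
    let base := PySem.List.slice s none (some (PySem.Int.floordiv length div))
    PySem.List.pyRepeat base div == s

-- ===== PRECONDITION & SPEC =====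
-- Pre_ excludes only div = 0, on which A raises ZeroDivisionError (length % 0)
def Pre_do_check (id : String) (div : Int) : Prop := div ≠ 0
instance (id : String) (div : Int) : Decidable (Pre_do_check id div) := by unfold Pre_do_check; infer_instance
def pvWitness_do_check : String × Int := ("abab", 2)

-- For negative div dividing len(id) with id nonempty, A returns True (range(div) is empty so
-- its all() is vacuous) while B returns False, the intended value: a nonempty string is not a
-- concatenation of a negative number of parts.
def D_do_check (id : String) (div : Int) : Prop :=
  div < 0 ∧ div ∣ (id.toList.length : Int) ∧ id.toList ≠ []
instance (id : String) (div : Int) : Decidable (D_do_check id div) := by unfold D_do_check; infer_instance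

def Spec_do_check (id : String) (div : Int) (out : Bool) : Prop :=
  ¬ D_do_check id div → out = do_check_alt id div
instance (id : String) (div : Int) (out : Bool) : Decidable (Spec_do_check id div out) := by unfold Spec_do_check; infer_instance

def pvDiffWitness_do_check : String × Int := ("aa", -2)
def pvDiffWitnessOut_do_check : Bool × Bool := (true, false)

-- ===== CLAIM (what is proved, stated in full; the proofs are below) =====
def Claim_unchanged_do_check : Prop := ∀ (id : String) (div : Int), Dom_do_check id div → Pre_do_check id div → Spec_do_check id div (do_check id div)
def Claim_changed_do_check : Prop := Dom_do_check (pvDiffWitness_do_check.1) (pvDiffWitness_do_check.2) ∧ Pre_do_check (pvDiffWitness_do_check.1) (pvDiffWitness_do_check.2) ∧ D_do_check (pvDiffWitness_do_check.1) (pvDiffWitness_do_check.2) ∧ do_check (pvDiffWitness_do_check.1) (pvDiffWitness_do_check.2) = pvDiffWitnessOut_do_check.1 ∧ do_check_alt (pvDiffWitness_do_check.1) (pvDiffWitness_do_check.2) = pvDiffWitnessOut_do_check.2 ∧ pvDiffWitnessOut_do_check.1 ≠ pvDiffWitnessOut_do_check.2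
def Claim_exact_do_check : Prop := ∀ (id : String) (div : Int), Dom_do_check id div → Pre_do_check id div → D_do_check id div → do_check id div ≠ do_check_alt id div

-- ===== LEMMAS AND PROOFS =====

-- the key fact: all k slices of width d equal b  ↔  b repeated k times rebuilds the list
theorem pv_key {α : Type} (k d : Nat) (L b : List α) (hb : b.length = d) (hlen : L.length = k * d) :
    ((∀ j < k, (L.drop (j * d)).take d = b) ↔ (List.replicate k b).flatten = L) := by
  induction k generalizing L with
  | zero =>
    simp only [Nat.zero_mul, List.length_eq_zero_iff] at hlen
    constructor
    · intro _; simp [hlen]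
    · intro _ j hj; omega
  | succ k ih =>
    have hdle : d ≤ L.length := by rw [hlen]; nlinarith
    have hR : (L.drop d).length = k * d := by
      rw [List.length_drop, hlen]; ring_nf; omega
    have ihR := ih (L.drop d) hR
    constructor
    · intro h
      have h0 : L.take d = b := by simpa using h 0 (by omega)
      have hrest : ∀ j < k, ((L.drop d).drop (j * d)).take d = b := by
        intro j hj
        have hj1 := h (j + 1) (by omega)
        rw [List.drop_drop, show d + j * d = (j + 1) * d by ring]
        exact hj1
      have hflatR := ihR.mp hrest
      calc (List.replicate (k + 1) b).flatten
          = b ++ (List.replicate k b).flatten := by simp [List.replicate_succ]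
        _ = L.take d ++ L.drop d := by rw [h0, hflatR]
        _ = L := List.take_append_drop d L
    · intro h j hj
      have hL : L = b ++ (List.replicate k b).flatten := by
        rw [← h]; simp [List.replicate_succ]
      have h0 : L.take d = b := by
        rw [hL, ← hb, List.take_left]
      have hdrop : L.drop d = (List.replicate k b).flatten := by
        rw [hL, ← hb, List.drop_left]
      have hrest : ∀ j' < k, ((L.drop d).drop (j' * d)).take d = b :=
        ihR.mpr hdrop.symm
      rcases j with _ | j
      · simpa using h0
      · have hj' := hrest j (by omega)
        rw [List.drop_drop, show d + j * d = (j + 1) * d by ring] at hj'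
        exact hj'

theorem do_check_eq_of_pos (id : String) (div : Int) (hpos : 0 < div) :
    do_check id div = do_check_alt id div := by
  simp only [do_check, do_check_alt]
  set s := id.toList with hs
  by_cases hdvd : div ∣ (s.length : Int)
  · have hmod : PySem.Int.mod (s.length : Int) div = 0 :=
      (PySem.Int.mod_eq_zero_iff_dvd _ _).mpr hdvd
    simp only [hmod, beq_self_eq_true, if_true, bne_self_eq_false,
      Bool.false_eq_true, if_false]
    obtain ⟨k, hk⟩ : ∃ k : Nat, div = (k : Int) := ⟨div.toNat, by omega⟩
    have hkpos : 0 < k := by omega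
    obtain ⟨d, hd⟩ : ∃ d : Nat, PySem.Int.floordiv (s.length : Int) div = (d : Int) := by
      rw [hk]; exact ⟨s.length / k, by exact_mod_cast PySem.Int.floordiv_natCast s.length k⟩
    have hlen : s.length = k * d := by
      have hq := PySem.Int.floordiv_mul_add_mod (s.length : Int) div
      rw [hd, hmod, hk, add_zero] at hq
      have hq' : d * k = s.length := by exact_mod_cast hq
      rw [← hq', Nat.mul_comm]
    have hparts : (PySem.List.pyRange 0 div 1).map
        (fun i => PySem.List.slice s (some (i * PySem.Int.floordiv (s.length : Int) div))
                                     (some ((i + 1) * PySem.Int.floordiv (s.length : Int) div)))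
        = (List.range k).map (fun j => (s.drop (j * d)).take d) := by
      rw [hd, hk, PySem.List.pyRange_one]
      simp only [zero_add, sub_zero, Int.toNat_natCast, List.map_map]
      refine List.map_congr_left ?_
      intro j _
      simp only [Function.comp_apply]
      have h1 : (j : Int) * (d : Int) = ((j * d : Nat) : Int) := by push_cast; ring
      have h2 : ((j : Int) + 1) * (d : Int) = ((j * d + d : Nat) : Int) := by push_cast; ring
      rw [h1, h2, PySem.List.slice_natCast]
      congr 1; omega
    have hbase : PySem.List.slice s none (some (PySem.Int.floordiv (s.length : Int) div))
        = s.take d := by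
      rw [hd, PySem.List.slice_to s (by exact_mod_cast d.zero_le)]
      simp
    have hbd : (s.take d).length = d := by
      simp only [List.length_take, hlen]
      exact Nat.min_eq_left (Nat.le_mul_of_pos_left d hkpos)
    have hrep : PySem.List.pyRepeat (s.take d) div = (List.replicate k (s.take d)).flatten := by
      simp [PySem.List.pyRepeat, hk]
    rw [hparts, hbase, hrep]
    obtain ⟨k', rfl⟩ : ∃ k', k = k' + 1 := ⟨k - 1, by omega⟩
    rw [List.range_succ_eq_map]
    simp only [List.map_cons, Nat.zero_mul, List.drop_zero, List.map_map]
    have hif : ∀ (c : Bool), (if c = true then true else false) = c := by decide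
    rw [hif]
    have hall : (((s.take d) :: (List.range k').map
          ((fun j => (s.drop (j * d)).take d) ∘ Nat.succ)).all (fun p => p == s.take d) = true)
        ↔ (∀ j < k' + 1, (s.drop (j * d)).take d = s.take d) := by
      simp only [List.all_cons, Bool.and_eq_true, beq_self_eq_true, true_and, List.all_map,
        List.all_eq_true, List.mem_range, Function.comp_apply, beq_iff_eq]
      constructor
      · intro h j hj
        rcases j with _ | j
        · simp
        · exact h j (by omega)
      · intro h j hj
        exact h (j + 1) (by omega)
    have hkey := pv_key (k' + 1) d s (s.take d) hbd hlen
    rcases Classical.em (∀ j < k' + 1, (s.drop (j * d)).take d = s.take d) with h | h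
    · rw [hall.mpr h]
      have := hkey.mp h
      rw [this]
      simp
    · have hfalse : (((s.take d) :: (List.range k').map
          ((fun j => (s.drop (j * d)).take d) ∘ Nat.succ)).all (fun p => p == s.take d)) = false := by
        rcases Bool.eq_false_or_eq_true _ with hb' | hb'
        · exact absurd (hall.mp hb') h
        · exact hb'
      rw [hfalse]
      have hne : (List.replicate (k' + 1) (s.take d)).flatten ≠ s := fun hc => h (hkey.mpr hc)
      exact (beq_eq_false_iff_ne.mpr hne).symm
  · have hmod : PySem.Int.mod (s.length : Int) div ≠ 0 := by
      intro h; exact hdvd ((PySem.Int.mod_eq_zero_iff_dvd _ _).mp h)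
    simp [hmod]

theorem pv_len_cast (id : String) : ((id.toList.length : Int)) = ((id.length : Int)) := by
  simp

theorem do_check_eq_of_not_dvd (id : String) (div : Int) (h : ¬ div ∣ (id.toList.length : Int)) :
    do_check id div = do_check_alt id div := by
  have hmod : PySem.Int.mod ((id.length : Int)) div ≠ 0 := by
    intro hm
    rw [← pv_len_cast] at hm
    exact h ((PySem.Int.mod_eq_zero_iff_dvd _ _).mp hm)
  simp [do_check, do_check_alt, hmod]

theorem pv_pyRepeat_neg {α : Type} (xs : List α) (div : Int) (hneg : div < 0) :
    PySem.List.pyRepeat xs div = [] := by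
  simp [PySem.List.pyRepeat, Int.toNat_of_nonpos (le_of_lt hneg)]

theorem do_check_eq_of_neg_nil (id : String) (div : Int) (hneg : div < 0) (hnil : id.toList = []) :
    do_check id div = do_check_alt id div := by
  have h0 : id.length = 0 := by
    have := congrArg List.length hnil
    simpa using this
  have hmod : PySem.Int.mod ((id.length : Int)) div = 0 := by
    rw [h0]
    exact (PySem.Int.mod_eq_zero_iff_dvd _ _).mpr (dvd_zero div)
  have hrange : PySem.List.pyRange 0 div 1 = [] := PySem.List.pyRange_one_eq_nil (by omega)
  simp [do_check, do_check_alt, hnil, hrange, pv_pyRepeat_neg _ div hneg]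

-- ===== VERDICT (by name: the statement is the Claim_ definition above) =====
theorem do_check_spec : Claim_unchanged_do_check := by
  intro id div _ hpre hnd
  unfold Pre_do_check at hpre
  unfold D_do_check at hnd
  rcases lt_trichotomy div 0 with hneg | hz | hpos
  · by_cases hdvd : div ∣ (id.toList.length : Int)
    · have hnil : id.toList = [] := by
        by_contra hne
        exact hnd ⟨hneg, hdvd, hne⟩
      exact do_check_eq_of_neg_nil id div hneg hnil
    · exact do_check_eq_of_not_dvd id div hdvd
  · exact absurd hz hpre
  · exact do_check_eq_of_pos id div hpos

theorem do_check_changed : Claim_changed_do_check := by unfold Claim_changed_do_check; decide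

theorem do_check_tight : Claim_exact_do_check := by
  intro id div _ _ hd
  obtain ⟨hneg, hdvd, hne⟩ := hd
  have hmod : PySem.Int.mod ((id.length : Int)) div = 0 := by
    rw [← pv_len_cast]
    exact (PySem.Int.mod_eq_zero_iff_dvd _ _).mpr hdvd
  have hrange : PySem.List.pyRange 0 div 1 = [] := PySem.List.pyRange_one_eq_nil (by omega)
  have hA : do_check id div = true := by
    simp [do_check, hmod, hrange]
  have hB : do_check_alt id div = false := by
    simp [do_check_alt, hmod, pv_pyRepeat_neg _ div hneg]
    exact fun hc => hne (by rw [hc]; decide)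
  rw [hA, hB]
  decide
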